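-- pv_equiv track=rewrite | github.com/Growail/Python-codes | kenken.py | operador5
-- ===== SOURCE A (Python) =====
-- def operador5(string):
--     resul=""
--     for i in string:
--         if i=="+":
--             resul="+"
--         elif i=="/":
--             resul="/"
--         elif i=="x":
--             resul="x"
--         elif i=="-":
--             resul="-"
--     return resul
-- ===== SOURCE B (Python) =====
-- def operador5(string):
--     for ch in reversed(string):
--         if ch in "+/x-":
--             return ch
--     return ""
-- ===== Notes on version B (the rewrite author's own statement) =====
-- stated objective: simpler
-- what changed: B scans the string from the right and returns the first operator it meets (early exit), instead of A's full left-to-right pass that overwrites an accumulator so the last operator wins.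
import Mathlib
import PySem

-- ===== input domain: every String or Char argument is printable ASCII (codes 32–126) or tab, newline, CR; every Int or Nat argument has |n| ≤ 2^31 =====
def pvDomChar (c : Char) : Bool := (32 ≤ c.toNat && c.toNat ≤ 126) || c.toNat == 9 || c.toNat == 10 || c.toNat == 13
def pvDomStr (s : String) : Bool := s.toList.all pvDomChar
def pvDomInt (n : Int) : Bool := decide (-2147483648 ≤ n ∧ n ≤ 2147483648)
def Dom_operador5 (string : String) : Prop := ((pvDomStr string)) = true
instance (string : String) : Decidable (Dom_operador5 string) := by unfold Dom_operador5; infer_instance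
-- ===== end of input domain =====

-- B scans the string from the right and early-returns the first operator it meets;
-- A does a full left-to-right pass overwriting an accumulator. Objective: simpler.

-- ===== PORT A =====
def operador5 (string : String) : String :=
  string.toList.foldl
    (fun resul i =>
      if i = '+' then "+"
      else if i = '/' then "/"
      else if i = 'x' then "x"
      else if i = '-' then "-"
      else resul) ""

-- ===== PORT B =====
-- `ch in "+/x-"` ported as membership in the literal's character list (exact for single chars)
def operador5AltGo : List Char → String
  | [] => ""
  | c :: rest => if ['+', '/', 'x', '-'].contains c then String.mk [c] else operador5AltGo rest

def operador5_alt (string : String) : String :=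
  operador5AltGo string.toList.reverse

-- ===== PRECONDITION & SPEC =====
def Spec_operador5 (string : String) (out : String) : Prop := out = operador5_alt string
instance (string : String) (out : String) : Decidable (Spec_operador5 string out) := by unfold Spec_operador5; infer_instance

-- ===== CLAIM (what is proved, stated in full; the proofs are below) =====
def Claim_equal_operador5 : Prop := ∀ (string : String), Dom_operador5 string → Spec_operador5 string (operador5 string)

-- ===== LEMMAS AND PROOFS =====

lemma operador5_fold_eq_go (l : List Char) (r : String) :
    l.foldl
      (fun resul i =>
        if i = '+' then "+"
        else if i = '/' then "/"
        else if i = 'x' then "x"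
        else if i = '-' then "-"
        else resul) r
    = (if operador5AltGo l.reverse = "" then r else operador5AltGo l.reverse) := by
  induction l using List.reverseRecOn generalizing r with
  | nil => simp [operador5AltGo]
  | append_singleton l' c ih =>
      rw [List.foldl_append]
      simp only [List.foldl_cons, List.foldl_nil, List.reverse_append, List.reverse_cons,
        List.reverse_nil, List.nil_append, List.cons_append]
      by_cases hp : c = '+'
      · subst hp; simp [operador5AltGo]; rfl
      · by_cases hs : c = '/'
        · subst hs; simp [operador5AltGo]; rfl
        · by_cases hx : c = 'x'
          · subst hx; simp [operador5AltGo]; rfl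
          · by_cases hm : c = '-'
            · subst hm; simp [operador5AltGo]; rfl
            · simp [operador5AltGo, hp, hs, hx, hm, ih]

-- ===== VERDICT (by name: the statement is the Claim_ definition above) =====
theorem operador5_spec : Claim_equal_operador5 := by
  intro s _
  unfold Spec_operador5 operador5 operador5_alt
  rw [operador5_fold_eq_go]
  split <;> simp_all
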